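-- pv_equiv track=rewrite | github.com/manuelrubio/recursion | tema01/codigo_01_06.py | suma_lista_limites_3
-- ===== SOURCE A (Python) =====
-- def suma_lista_limites_3(a, inf, sup):
--     if inf > sup:
--         return 0
--     elif inf == sup:
--         return a[inf]  # or a[sup]
--     else:
--         mitad = (sup + inf) // 2
--         return (suma_lista_limites_3(a, inf, mitad)
--                 + suma_lista_limites_3(a, mitad + 1, sup))
-- ===== SOURCE B (Python) =====
-- def suma_lista_limites_3(a, inf, sup):
--     total = 0
--     for i in range(inf, sup + 1):
--         total += a[i]
--     return total
-- ===== Notes on version B (the rewrite author's own statement) =====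
-- stated objective: simpler
-- what changed: Replaced the divide-and-conquer recursion with a single iterative accumulator loop over range(inf, sup+1).
import Mathlib
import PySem

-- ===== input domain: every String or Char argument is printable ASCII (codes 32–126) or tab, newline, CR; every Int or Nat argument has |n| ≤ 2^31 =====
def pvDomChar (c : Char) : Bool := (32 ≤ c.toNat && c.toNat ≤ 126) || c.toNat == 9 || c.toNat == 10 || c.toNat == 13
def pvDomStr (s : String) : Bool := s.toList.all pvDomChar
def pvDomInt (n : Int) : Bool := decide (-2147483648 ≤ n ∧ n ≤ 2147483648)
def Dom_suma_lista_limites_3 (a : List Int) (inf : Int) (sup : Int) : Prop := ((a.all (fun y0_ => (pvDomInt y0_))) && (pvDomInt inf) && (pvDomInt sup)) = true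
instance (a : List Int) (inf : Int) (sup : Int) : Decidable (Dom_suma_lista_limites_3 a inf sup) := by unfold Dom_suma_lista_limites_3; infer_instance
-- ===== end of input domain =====

-- B replaces A's divide-and-conquer recursion by one iterative accumulator loop (simpler; same cost).
-- ===== PORT A =====
def suma_lista_limites_3 (a : List Int) (inf : Int) (sup : Int) : Int :=
  if inf > sup then 0
  else if inf = sup then PySem.List.pyGetD a inf 0
  else
    let mitad := PySem.Int.floordiv (sup + inf) 2
    suma_lista_limites_3 a inf mitad + suma_lista_limites_3 a (mitad + 1) sup
termination_by (sup - inf).toNat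
decreasing_by
  all_goals
    simp only [PySem.Int.floordiv_eq_ediv_of_pos (show (0:Int) < 2 by norm_num)] at *
    omega

-- ===== PORT B =====
def suma_lista_limites_3_alt (a : List Int) (inf : Int) (sup : Int) : Int :=
  (PySem.List.pyRange inf (sup + 1) 1).foldl (fun total i => total + PySem.List.pyGetD a i 0) 0

-- ===== PRECONDITION & SPEC =====
-- Pre_ excludes exactly the inputs where Python's a[i] raises IndexError (in both A and B):
-- some index i in [inf, sup] outside [-len(a), len(a)).
def Pre_suma_lista_limites_3 (a : List Int) (inf : Int) (sup : Int) : Prop :=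
  inf > sup ∨ (-(a.length : Int) ≤ inf ∧ sup < (a.length : Int))
instance (a : List Int) (inf : Int) (sup : Int) : Decidable (Pre_suma_lista_limites_3 a inf sup) := by unfold Pre_suma_lista_limites_3; infer_instance
def pvWitness_suma_lista_limites_3 : List Int × Int × Int := ([3, 1, 4, 1, 5], 1, 3)

def Spec_suma_lista_limites_3 (a : List Int) (inf : Int) (sup : Int) (out : Int) : Prop := out = suma_lista_limites_3_alt a inf sup
instance (a : List Int) (inf : Int) (sup : Int) (out : Int) : Decidable (Spec_suma_lista_limites_3 a inf sup out) := by unfold Spec_suma_lista_limites_3; infer_instance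

-- ===== CLAIM (what is proved, stated in full; the proofs are below) =====
def Claim_equal_suma_lista_limites_3 : Prop := ∀ (a : List Int) (inf : Int) (sup : Int), Dom_suma_lista_limites_3 a inf sup → Pre_suma_lista_limites_3 a inf sup → Spec_suma_lista_limites_3 a inf sup (suma_lista_limites_3 a inf sup)

-- ===== LEMMAS AND PROOFS =====

-- B as a sum over the range of indices.
theorem alt_eq_sum (a : List Int) (inf sup : Int) :
    suma_lista_limites_3_alt a inf sup
      = ((PySem.List.pyRange inf (sup + 1) 1).map (fun i => PySem.List.pyGetD a i 0)).sum := by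
  unfold suma_lista_limites_3_alt
  rw [PySem.List.foldl_add]
  simp

-- A computes the same sum (regardless of Pre_: pyGetD totalizes the out-of-range accesses).
theorem a_eq_sum (n : Nat) : ∀ (a : List Int) (inf sup : Int), (sup - inf).toNat ≤ n →
    suma_lista_limites_3 a inf sup
      = ((PySem.List.pyRange inf (sup + 1) 1).map (fun i => PySem.List.pyGetD a i 0)).sum := by
  induction n with
  | zero =>
    intro a inf sup h
    unfold suma_lista_limites_3
    rcases lt_trichotomy inf sup with hlt | heq | hgt
    · omega
    · subst heq
      simp [PySem.List.pyRange_one_singleton]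
    · rw [if_pos hgt, PySem.List.pyRange_one_eq_nil (by omega)]
      simp
  | succ n ih =>
    intro a inf sup h
    unfold suma_lista_limites_3
    rcases lt_trichotomy inf sup with hlt | heq | hgt
    · rw [if_neg (by omega), if_neg (by omega)]
      have hmid : inf ≤ PySem.Int.floordiv (sup + inf) 2 ∧ PySem.Int.floordiv (sup + inf) 2 < sup := by
        rw [PySem.Int.floordiv_eq_ediv_of_pos (by norm_num)]
        omega
      set m := PySem.Int.floordiv (sup + inf) 2 with hm
      show suma_lista_limites_3 a inf m + suma_lista_limites_3 a (m + 1) sup = _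
      rw [ih a inf m (by omega), ih a (m + 1) sup (by omega),
        PySem.List.pyRange_one_append inf (m + 1) (sup + 1) (by omega) (by omega)]
      simp
    · subst heq
      rw [if_neg (by omega), if_pos rfl]
      simp [PySem.List.pyRange_one_singleton]
    · rw [if_pos hgt, PySem.List.pyRange_one_eq_nil (by omega)]
      simp

-- ===== VERDICT (by name: the statement is the Claim_ definition above) =====
theorem suma_lista_limites_3_spec : Claim_equal_suma_lista_limites_3 := by
  intro a inf sup _ _
  unfold Spec_suma_lista_limites_3
  rw [alt_eq_sum, a_eq_sum (sup - inf).toNat a inf sup le_rfl]
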